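-- pv_equiv track=rewrite | github.com/Bomin-Seo/Study | Coding Test/Programmers_python/Level1/programmers_lv1_부족한금액계산하기.py | solution
-- ===== SOURCE A (Python) =====
-- def solution(price, money, count):
--     answer = 0
--     n = 0
--     while count != 0:
--         n += 1
--         money -= price * n
--         count -= 1
--
--     if money < 0:
--         answer = (-1) * money
--     return answer
-- ===== SOURCE B (Python) =====
-- def solution(price, money, count):
--     total = price * count * (count + 1) // 2
--     shortfall = total - money
--     return shortfall if shortfall > 0 else 0
-- ===== Notes on version B (the rewrite author's own statement) =====
-- stated objective: faster
-- what changed: Replaces the O(count) subtraction loop with the closed-form arithmetic series price*count*(count+1)//2 and one comparison.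
import Mathlib
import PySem

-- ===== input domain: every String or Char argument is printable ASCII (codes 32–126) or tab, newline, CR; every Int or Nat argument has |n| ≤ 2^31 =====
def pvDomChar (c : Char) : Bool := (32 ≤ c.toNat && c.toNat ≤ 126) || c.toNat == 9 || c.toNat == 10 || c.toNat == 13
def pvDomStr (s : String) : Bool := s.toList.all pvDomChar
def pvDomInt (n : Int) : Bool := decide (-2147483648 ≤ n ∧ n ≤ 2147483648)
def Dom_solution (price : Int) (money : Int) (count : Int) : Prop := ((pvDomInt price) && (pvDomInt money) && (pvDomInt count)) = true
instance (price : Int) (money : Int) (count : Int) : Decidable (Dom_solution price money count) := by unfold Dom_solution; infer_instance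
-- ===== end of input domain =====

-- B replaces A's O(count) subtraction loop with the closed-form arithmetic series (O(1)).


-- ===== PORT A =====
-- the while loop: each iteration does n += 1; money -= price * n; count -= 1.
-- k is the remaining iteration count (count.toNat; Pre_ requires 0 ≤ count).
def solutionLoop (price : Int) : Nat → Int → Int → Int
  | 0, _, money => money
  | k + 1, n, money => solutionLoop price k (n + 1) (money - price * (n + 1))

def solution (price : Int) (money : Int) (count : Int) : Int :=
  let money' := solutionLoop price count.toNat 0 money
  if money' < 0 then (-1) * money' else 0

-- ===== PORT B =====
def solution_alt (price : Int) (money : Int) (count : Int) : Int :=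
  let total := PySem.Int.floordiv (price * count * (count + 1)) 2
  let shortfall := total - money
  if shortfall > 0 then shortfall else 0

-- ===== PRECONDITION & SPEC =====
-- Pre_ excludes count < 0, on which A's 'while count != 0' loop never terminates.
def Pre_solution (price : Int) (money : Int) (count : Int) : Prop := 0 ≤ count
instance (price : Int) (money : Int) (count : Int) : Decidable (Pre_solution price money count) := by unfold Pre_solution; infer_instance
def pvWitness_solution : Int × Int × Int := (3, 20, 4)

def Spec_solution (price : Int) (money : Int) (count : Int) (out : Int) : Prop := out = solution_alt price money count
instance (price : Int) (money : Int) (count : Int) (out : Int) : Decidable (Spec_solution price money count out) := by unfold Spec_solution; infer_instance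

-- ===== CLAIM (what is proved, stated in full; the proofs are below) =====
def Claim_equal_solution : Prop := ∀ (price : Int) (money : Int) (count : Int), Dom_solution price money count → Pre_solution price money count → Spec_solution price money count (solution price money count)

-- ===== LEMMAS AND PROOFS =====

-- sum of the k terms (n+1), (n+2), …, (n+k)
def sumFrom : Nat → Int → Int
  | 0, _ => 0
  | k + 1, n => (n + 1) + sumFrom k (n + 1)

theorem two_mul_sumFrom (k : Nat) : ∀ n : Int, 2 * sumFrom k n = k * (2 * n + k + 1) := by
  induction k with
  | zero => intro n; simp [sumFrom]
  | succ k ih =>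
    intro n
    have h := ih (n + 1)
    simp only [sumFrom]
    push_cast
    linear_combination h

theorem solutionLoop_eq (price : Int) (k : Nat) :
    ∀ (n money : Int), solutionLoop price k n money = money - price * sumFrom k n := by
  induction k with
  | zero => intro n money; simp [solutionLoop, sumFrom]
  | succ k ih =>
    intro n money
    simp only [solutionLoop, sumFrom, ih]
    ring

-- ===== VERDICT (by name: the statement is the Claim_ definition above) =====
theorem solution_spec : Claim_equal_solution := by
  intro price money count _ hpre
  unfold Spec_solution solution solution_alt
  have hc : ((count.toNat : Int)) = count := Int.toNat_of_nonneg hpre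
  have hsum : price * count * (count + 1) = 2 * (price * sumFrom count.toNat 0) := by
    have h := two_mul_sumFrom count.toNat 0
    rw [hc] at h
    linear_combination (-price) * h
  have hdiv : PySem.Int.floordiv (price * count * (count + 1)) 2
      = price * sumFrom count.toNat 0 := by
    rw [PySem.Int.floordiv_eq_ediv_of_pos (by norm_num), hsum,
      Int.mul_ediv_cancel_left _ (by norm_num)]
  rw [solutionLoop_eq, hdiv]
  set T := price * sumFrom count.toNat 0 with hT
  simp only []
  split_ifs <;> omega
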